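-- pv_equiv track=rewrite | github.com/bogdan-dilaj/openshorts | app.py | _extract_actionable_job_error
-- ===== SOURCE A (Python) =====
-- from typing import Any, Dict, Optional, List, Tuple
--
-- def _extract_actionable_job_error(logs: Optional[List[str]]) -> Optional[str]:
--     if not logs:
--         return None
--
--     cleaned = [str(line).strip() for line in logs if str(line).strip()]
--     if not cleaned:
--         return None
--
--     for line in reversed(cleaned):
--         lower = line.lower()
--         if lower.startswith("reason:"):
--             reason = line.split(":", 1)[1].strip()
--             if reason:
--                 return reason
--
--     prioritized_markers = (
--         "runtimeerror:",
--         "unable to access a high-quality youtube source",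
--         "unable to download a usable high-quality youtube source",
--         "unable to download api page",
--         "failed to resolve",
--         "temporary failure in name resolution",
--         "execution error:",
--         "fatal error",
--     )
--     for marker in prioritized_markers:
--         for line in reversed(cleaned):
--             lower = line.lower()
--             if marker not in lower:
--                 continue
--             if lower.startswith("runtimeerror:"):
--                 return line.split(":", 1)[1].strip() or line
--             if lower.startswith("execution error:"):
--                 return line.split(":", 1)[1].strip() or line
--             return line
--
--     for line in reversed(cleaned):
--         lower = line.lower()
--         if "error" in lower or "failed" in lower:
--             return line
--     return None
-- ===== SOURCE B (Python) =====
-- from typing import Optional, List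
--
-- _MARKERS = (
--     "runtimeerror:",
--     "unable to access a high-quality youtube source",
--     "unable to download a usable high-quality youtube source",
--     "unable to download api page",
--     "failed to resolve",
--     "temporary failure in name resolution",
--     "execution error:",
--     "fatal error",
-- )
--
--
-- def _resolve_marker_line(line: str) -> str:
--     lower = line.lower()
--     if lower.startswith("runtimeerror:") or lower.startswith("execution error:"):
--         return line.split(":", 1)[1].strip() or line
--     return line
--
--
-- def _extract_actionable_job_error(logs: Optional[List[str]]) -> Optional[str]:
--     if not logs:
--         return None
--     cleaned = [str(line).strip() for line in logs if str(line).strip()]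
--     if not cleaned:
--         return None
--
--     reason = None          # first non-empty value after 'reason:' in reversed order
--     best = None            # (marker index, line): lowest marker index, earliest in reversed order
--     fallback = None        # first reversed line containing 'error' or 'failed'
--     for line in reversed(cleaned):
--         lower = line.lower()
--         if reason is None and lower.startswith("reason:"):
--             value = line.split(":", 1)[1].strip()
--             if value:
--                 reason = value
--         idx = next((i for i, m in enumerate(_MARKERS) if m in lower), None)
--         if idx is not None and (best is None or idx < best[0]):
--             best = (idx, line)
--         if fallback is None and ("error" in lower or "failed" in lower):
--             fallback = line
--
--     if reason is not None:
--         return reason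
--     if best is not None:
--         return _resolve_marker_line(best[1])
--     return fallback
-- ===== Notes on version B (the rewrite author's own statement) =====
-- stated objective: alternative
-- what changed: Replaced A's up-to-10 separate reverse scans (reason scan, one scan per each of 8 prioritized markers, fallback scan) by a single pass over the reversed lines that fills three buckets (first non-empty reason, lowest-marker-index earliest line, first error/failed line) and resolves them by priority afterwards.
import Mathlib
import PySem

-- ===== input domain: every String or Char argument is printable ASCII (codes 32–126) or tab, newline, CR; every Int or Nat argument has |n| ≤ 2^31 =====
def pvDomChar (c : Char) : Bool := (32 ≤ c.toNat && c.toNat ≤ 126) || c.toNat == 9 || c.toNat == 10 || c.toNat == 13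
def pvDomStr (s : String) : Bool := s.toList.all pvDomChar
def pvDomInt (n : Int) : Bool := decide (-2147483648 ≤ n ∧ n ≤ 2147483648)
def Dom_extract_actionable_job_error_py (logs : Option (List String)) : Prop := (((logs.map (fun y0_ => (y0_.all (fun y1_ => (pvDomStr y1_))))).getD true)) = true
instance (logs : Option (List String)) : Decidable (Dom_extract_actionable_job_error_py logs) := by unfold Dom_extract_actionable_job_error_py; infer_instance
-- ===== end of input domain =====

-- One honest line: B replaces A's up-to-10 separate reverse scans by a single pass over the
-- reversed lines filling three priority buckets, resolved afterwards (alternative decomposition).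

-- line.split(":", 1)[1]  — exact at every call site: there the line starts (case-insensitively)
-- with "reason:" / "runtimeerror:" / "execution error:", so it contains ':' and index 1 exists.
def pvSplitColonTail (line : String) : String :=
  ((PySem.Str.splitMax? line ":" 1).getD []).getD 1 ""

-- ===== PORT A =====
def pvMarkersA : List String :=
  ["runtimeerror:",
   "unable to access a high-quality youtube source",
   "unable to download a usable high-quality youtube source",
   "unable to download api page",
   "failed to resolve",
   "temporary failure in name resolution",
   "execution error:",
   "fatal error"]

-- A's first loop: for line in reversed(cleaned): if lower.startswith("reason:") …
def pvReasonScanA : List String → Option String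
  | [] => none
  | line :: rest =>
    let lower := PySem.Str.lower line
    if PySem.Str.startswith lower "reason:" then
      let reason := PySem.Str.strip (pvSplitColonTail line)
      if reason = "" then pvReasonScanA rest else some reason
    else pvReasonScanA rest

-- A's inner loop for one marker: for line in reversed(cleaned): …
def pvMarkerInnerA (marker : String) : List String → Option String
  | [] => none
  | line :: rest =>
    let lower := PySem.Str.lower line
    if !(PySem.Str.isIn marker lower) then pvMarkerInnerA marker rest
    else if PySem.Str.startswith lower "runtimeerror:" then
      some (if PySem.Str.strip (pvSplitColonTail line) = "" then line
            else PySem.Str.strip (pvSplitColonTail line))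
    else if PySem.Str.startswith lower "execution error:" then
      some (if PySem.Str.strip (pvSplitColonTail line) = "" then line
            else PySem.Str.strip (pvSplitColonTail line))
    else some line

-- A's outer loop: for marker in prioritized_markers: …
def pvMarkerOuterA : List String → List String → Option String
  | [], _ => none
  | m :: ms, rev =>
    match pvMarkerInnerA m rev with
    | some r => some r
    | none => pvMarkerOuterA ms rev

-- A's last loop: for line in reversed(cleaned): if "error" in lower or "failed" in lower …
def pvFallbackA : List String → Option String
  | [] => none
  | line :: rest =>
    let lower := PySem.Str.lower line
    if PySem.Str.isIn "error" lower || PySem.Str.isIn "failed" lower then some line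
    else pvFallbackA rest

def extract_actionable_job_error_py (logs : Option (List String)) : Option String :=
  match logs with
  | none => none
  | some ls =>
    if ls = [] then none
    else
      let cleaned := (ls.filter (fun line => !(PySem.Str.strip line = ""))).map
        (fun line => PySem.Str.strip line)
      if cleaned = [] then none
      else
        let rev := cleaned.reverse
        match pvReasonScanA rev with
        | some r => some r
        | none =>
          match pvMarkerOuterA pvMarkersA rev with
          | some r => some r
          | none => pvFallbackA rev

-- ===== PORT B =====
def pvMarkersB : List String :=
  ["runtimeerror:",
   "unable to access a high-quality youtube source",
   "unable to download a usable high-quality youtube source",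
   "unable to download api page",
   "failed to resolve",
   "temporary failure in name resolution",
   "execution error:",
   "fatal error"]

def pvResolveMarkerLineB (line : String) : String :=
  let lower := PySem.Str.lower line
  if PySem.Str.startswith lower "runtimeerror:" || PySem.Str.startswith lower "execution error:" then
    if PySem.Str.strip (pvSplitColonTail line) = "" then line
    else PySem.Str.strip (pvSplitColonTail line)
  else line

-- one step of B's single pass; state = (reason, best, fallback)
def pvStepB (st : Option String × Option (Nat × String) × Option String) (line : String) :
    Option String × Option (Nat × String) × Option String :=
  let lower := PySem.Str.lower line
  let r := st.1
  let b := st.2.1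
  let f := st.2.2
  let r' :=
    match r with
    | some v => some v
    | none =>
      if PySem.Str.startswith lower "reason:" then
        let value := PySem.Str.strip (pvSplitColonTail line)
        if value = "" then none else some value
      else none
  let b' :=
    match pvMarkersB.findIdx? (fun m => PySem.Str.isIn m lower) with
    | none => b
    | some i =>
      match b with
      | none => some (i, line)
      | some (j, L) => if i < j then some (i, line) else some (j, L)
  let f' :=
    match f with
    | some v => some v
    | none =>
      if PySem.Str.isIn "error" lower || PySem.Str.isIn "failed" lower then some line
      else none
  (r', b', f')

def extract_actionable_job_error_py_alt (logs : Option (List String)) : Option String :=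
  match logs with
  | none => none
  | some ls =>
    if ls = [] then none
    else
      let cleaned := (ls.filter (fun line => !(PySem.Str.strip line = ""))).map
        (fun line => PySem.Str.strip line)
      if cleaned = [] then none
      else
        let st := cleaned.reverse.foldl pvStepB (none, none, none)
        match st.1 with
        | some r => some r
        | none =>
          match st.2.1 with
          | some (_, line) => some (pvResolveMarkerLineB line)
          | none => st.2.2

-- ===== PRECONDITION & SPEC =====
def Spec_extract_actionable_job_error_py (logs : Option (List String)) (out : Option String) : Prop := out = extract_actionable_job_error_py_alt logs
instance (logs : Option (List String)) (out : Option String) : Decidable (Spec_extract_actionable_job_error_py logs out) := by unfold Spec_extract_actionable_job_error_py; infer_instance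

-- ===== CLAIM (what is proved, stated in full; the proofs are below) =====
def Claim_equal_extract_actionable_job_error_py : Prop := ∀ (logs : Option (List String)), Dom_extract_actionable_job_error_py logs → Spec_extract_actionable_job_error_py logs (extract_actionable_job_error_py logs)

-- ===== LEMMAS AND PROOFS =====

-- best candidate of a line list under markers ms: lowest marker index, then earliest line
def pvApair (ms : List String) : List String → Option (Nat × String)
  | [] => none
  | l :: xs =>
    match ms.findIdx? (fun m => PySem.Str.isIn m (PySem.Str.lower l)) with
    | none => pvApair ms xs
    | some i =>
      match pvApair ms xs with
      | none => some (i, l)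
      | some (j, L) => if i ≤ j then some (i, l) else some (j, L)

def pvMergeAcc (b : Option (Nat × String)) (p : Option (Nat × String)) : Option (Nat × String) :=
  match b, p with
  | none, p => p
  | some bv, none => some bv
  | some (j, L), some (i, l) => if i < j then some (i, l) else some (j, L)

theorem pvApair_nil_markers (xs : List String) : pvApair [] xs = none := by
  induction xs with
  | nil => rfl
  | cons l xs ih => simp [pvApair, ih]

theorem pvApair_cons_marker (p : String) (ps : List String) (xs : List String) :
    pvApair (p :: ps) xs =
      match xs.find? (fun l => PySem.Str.isIn p (PySem.Str.lower l)) with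
      | some L => some (0, L)
      | none => (pvApair ps xs).map (fun q => (q.1 + 1, q.2)) := by
  induction xs with
  | nil => rfl
  | cons l xs ih =>
    simp only [pvApair, List.findIdx?_cons, List.find?_cons]
    rcases hp : PySem.Str.isIn p (PySem.Str.lower l) with _ | _
    case true =>
      simp only [hp]
      rw [ih]
      cases hfind : xs.find? (fun l => PySem.Str.isIn p (PySem.Str.lower l)) with
      | none =>
        cases hq : pvApair ps xs with
        | none => simp
        | some q => simp
      | some L => simp
    case false =>
      simp only [hp, Bool.false_eq_true, if_neg (Bool.false_ne_true), ih]
      cases hps : ps.findIdx? (fun m => PySem.Str.isIn m (PySem.Str.lower l)) with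
      | none => simp
      | some i =>
        cases hfind : xs.find? (fun l => PySem.Str.isIn p (PySem.Str.lower l)) with
        | none =>
          cases hq : pvApair ps xs with
          | none => simp
          | some q =>
            obtain ⟨j, L⟩ := q
            by_cases hij : i ≤ j
            · simp [hij]
            · simp [hij]
        | some L => simp

theorem pvMarkerInnerA_eq_find (m : String) (xs : List String) :
    pvMarkerInnerA m xs =
      (xs.find? (fun l => PySem.Str.isIn m (PySem.Str.lower l))).map pvResolveMarkerLineB := by
  induction xs with
  | nil => rfl
  | cons l xs ih =>
    simp only [pvMarkerInnerA, List.find?_cons]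
    rcases hm : PySem.Str.isIn m (PySem.Str.lower l) with _ | _
    case true =>
      simp only [hm, Bool.not_true, Bool.false_eq_true, if_neg (Bool.false_ne_true),
        Option.map_some, pvResolveMarkerLineB]
      rcases h1 : PySem.Str.startswith (PySem.Str.lower l) "runtimeerror:" with _ | _ <;>
        rcases h2 : PySem.Str.startswith (PySem.Str.lower l) "execution error:" with _ | _ <;>
          simp only [h1, h2, Bool.true_or, Bool.or_true, Bool.false_or, Bool.or_false] <;>
          simp
    case false =>
      simp only [hm, Bool.not_false, if_pos rfl, ih]
      simp

theorem pvMarkerOuterA_eq_apair (ms : List String) (xs : List String) :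
    pvMarkerOuterA ms xs = (pvApair ms xs).map (fun q => pvResolveMarkerLineB q.2) := by
  induction ms with
  | nil => simp [pvMarkerOuterA, pvApair_nil_markers]
  | cons m ms ih =>
    simp only [pvMarkerOuterA, pvMarkerInnerA_eq_find, pvApair_cons_marker, ih]
    cases hfind : xs.find? (fun l => PySem.Str.isIn m (PySem.Str.lower l)) with
    | some L => simp
    | none =>
      cases hq : pvApair ms xs with
      | none => simp
      | some q => simp

-- one fold step of the best bucket commutes with the cons step of pvApair
theorem pvMerge_step (i : Nat) (l : String) (b p : Option (Nat × String)) :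
    pvMergeAcc
        (match b with
         | none => some (i, l)
         | some (j, L) => if i < j then some (i, l) else some (j, L)) p =
      pvMergeAcc b
        (match p with
         | none => some (i, l)
         | some (j, L) => if i ≤ j then some (i, l) else some (j, L)) := by
  cases b with
  | none =>
    cases p with
    | none => rfl
    | some q =>
      obtain ⟨j, L⟩ := q
      simp only [pvMergeAcc]
      split_ifs <;> first | rfl | (exfalso; omega)
  | some bv =>
    obtain ⟨k, K⟩ := bv
    cases p with
    | none =>
      simp only [pvMergeAcc]
      split_ifs <;> simp only [pvMergeAcc] <;> (try split_ifs) <;>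
        first | rfl | (exfalso; omega)
    | some q =>
      obtain ⟨j, L⟩ := q
      simp only [pvMergeAcc]
      split_ifs <;> simp only [pvMergeAcc] <;> (try split_ifs) <;>
        first | rfl | (exfalso; omega)
-- the single fold computes the three scans at once
theorem pvFold_eq (xs : List String) :
    ∀ (r b f : _),
      xs.foldl pvStepB (r, b, f) =
        (r.or (pvReasonScanA xs), pvMergeAcc b (pvApair pvMarkersB xs), f.or (pvFallbackA xs)) := by
  induction xs with
  | nil =>
    intro r b f
    cases r <;> cases f <;> cases b <;> simp [pvReasonScanA, pvFallbackA, pvApair, pvMergeAcc, Option.or]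
  | cons l xs ih =>
    intro r b f
    rw [List.foldl_cons, pvStepB, ih]
    refine Prod.ext ?_ (Prod.ext ?_ ?_)
    · -- reason component
      simp only [pvReasonScanA]
      cases r with
      | some v => rfl
      | none => split_ifs <;> rfl
    · -- best component
      simp only [pvApair]
      cases hi : pvMarkersB.findIdx? (fun m => PySem.Str.isIn m (PySem.Str.lower l)) with
      | none => rfl
      | some i => exact pvMerge_step i l b (pvApair pvMarkersB xs)
    · -- fallback component
      simp only [pvFallbackA]
      cases f with
      | some v => rfl
      | none => split_ifs <;> rfl

-- ===== VERDICT (by name: the statement is the Claim_ definition above) =====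
theorem extract_actionable_job_error_py_spec : Claim_equal_extract_actionable_job_error_py := by
  intro logs _
  unfold Spec_extract_actionable_job_error_py extract_actionable_job_error_py
    extract_actionable_job_error_py_alt
  cases logs with
  | none => rfl
  | some ls =>
    by_cases hls : ls = []
    · simp [hls]
    · simp only [if_neg hls]
      set cleaned := (ls.filter (fun line => !(PySem.Str.strip line = ""))).map
        (fun line => PySem.Str.strip line) with hc
      by_cases hcl : cleaned = []
      · simp [hcl]
      · simp only [if_neg hcl]
        rw [pvFold_eq]
        have hmk : pvMarkersB = pvMarkersA := rfl
        rw [hmk, pvMarkerOuterA_eq_apair]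
        cases hr : pvReasonScanA cleaned.reverse with
        | some v => simp [Option.or]
        | none =>
          simp only [Option.or]
          cases hq : pvApair pvMarkersA cleaned.reverse with
          | none => simp [pvMergeAcc]
          | some q => obtain ⟨j, L⟩ := q; simp [pvMergeAcc]
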